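-- pv_equiv track=rewrite | github.com/JohnSunny21/python-daily-coding | FreeCodeCamp/CodingQ/EmailSorter.py | sort_email
-- ===== SOURCE A (Python) =====
-- def sort_email(emails):
--
--     sorted_emails = sorted(emails, key= lambda x: x.split("@")[-1].lower())
--
--
--     count = 1
--
--     for i in range(len(sorted_emails) - 1):
--         if sorted_emails[i].split('@')[-1].lower() == sorted_emails[i+1].split('@')[-1].lower():
--             count += 1
--         elif sorted_emails[i].split('@')[-1].lower() != sorted_emails[i+1].split('@')[-1].lower():
--             break
--
--     sorted_emails2 = sorted(sorted_emails[:count], key= lambda x: x.split('@')[0].lower())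
--
--     final_sort = sorted_emails2 + sorted_emails[count:]
--
--     return final_sort
-- ===== SOURCE B (Python) =====
-- def sort_email(emails):
--     buckets = {}
--     for e in emails:
--         buckets.setdefault(e.split('@')[-1].lower(), []).append(e)
--     doms = sorted(buckets)
--     if not doms:
--         return []
--     result = sorted(buckets[doms[0]], key=lambda e: e.split('@')[0].lower())
--     for d in doms[1:]:
--         result.extend(buckets[d])
--     return result
-- ===== Notes on version B (the rewrite author's own statement) =====
-- stated objective: alternative
-- what changed: Replaces the global stable sort of all emails plus run-counting loop and slice/concatenate with dict bucketing: group emails by lowercased domain in one pass, sort only the distinct domain keys, sort the first domain's bucket by local part, and concatenate buckets in key order (correct because a stable sort by domain is exactly the buckets concatenated in sorted key order).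
import Mathlib
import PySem

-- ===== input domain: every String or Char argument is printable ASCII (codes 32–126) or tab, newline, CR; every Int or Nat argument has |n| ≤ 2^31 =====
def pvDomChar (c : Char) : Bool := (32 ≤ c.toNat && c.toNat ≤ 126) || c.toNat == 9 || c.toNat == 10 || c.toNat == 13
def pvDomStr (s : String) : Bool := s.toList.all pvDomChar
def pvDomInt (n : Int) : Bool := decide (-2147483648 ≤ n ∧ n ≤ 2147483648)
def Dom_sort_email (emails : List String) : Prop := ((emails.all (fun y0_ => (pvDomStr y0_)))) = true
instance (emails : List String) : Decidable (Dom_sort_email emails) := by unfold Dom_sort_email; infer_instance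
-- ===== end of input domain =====

-- B replaces A's global stable sort + run-counting loop + slice/concatenate with dict bucketing
-- by lowercased domain, sorting only the distinct domain keys, re-sorting the first bucket by
-- local part, and concatenating buckets in key order (objective: alternative).

-- key helpers shared by both ports: x.split('@')[-1].lower() and x.split('@')[0].lower()
-- (split('@') is never empty, so the .getD "" default is never used)
def kDom (s : String) : String :=
  PySem.Str.lower ((PySem.List.pyGet? ((PySem.Str.split? s "@").getD []) (-1)).getD "")

def kLoc (s : String) : String :=
  PySem.Str.lower ((PySem.List.pyGet? ((PySem.Str.split? s "@").getD []) 0).getD "")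

-- ===== PORT A =====
-- A's for-loop over i in range(len-1) with break, comparing sorted_emails[i] and
-- sorted_emails[i+1], ported as the obvious structural recursion over adjacent pairs.
def countRun : List String → Int
  | x :: y :: rest => if kDom x == kDom y then 1 + countRun (y :: rest) else 1
  | _ => 1

def sort_email (emails : List String) : List String :=
  let sorted_emails := PySem.List.sorted emails kDom
  let count := countRun sorted_emails
  let sorted_emails2 := PySem.List.sorted (PySem.List.slice sorted_emails none (some count)) kLoc
  sorted_emails2 ++ PySem.List.slice sorted_emails (some count) none

-- ===== PORT B =====
-- buckets.setdefault(dom, []).append(e)  ==  d[dom] = d.get(dom, []) + [e]  ==  Dict.modify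
def sort_email_alt (emails : List String) : List String :=
  let buckets := emails.foldl
    (fun d e => PySem.Dict.modify d (kDom e) [] (fun l => l ++ [e])) PySem.Dict.empty
  let doms := PySem.List.sorted (PySem.Dict.keys buckets) (fun x => x)
  match doms with
  | [] => []
  | d0 :: rest =>
    rest.foldl (fun acc d => acc ++ PySem.Dict.getD buckets d [])
      (PySem.List.sorted (PySem.Dict.getD buckets d0 []) kLoc)

-- ===== PRECONDITION & SPEC =====
def Spec_sort_email (emails : List String) (out : List String) : Prop := out = sort_email_alt emails
instance (emails : List String) (out : List String) : Decidable (Spec_sort_email emails out) := by unfold Spec_sort_email; infer_instance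

-- ===== CLAIM =====
def Claim_equal_sort_email : Prop := ∀ (emails : List String), Dom_sort_email emails → Spec_sort_email emails (sort_email emails)

-- ===== LEMMAS AND PROOFS =====

theorem countRun_pos (l : List String) : 1 ≤ countRun l := by
  match l with
  | [] => simp [countRun]
  | [x] => simp [countRun]
  | x :: y :: rest =>
    by_cases h : kDom x == kDom y
    · have := countRun_pos (y :: rest)
      simp [countRun, h]; omega
    · simp [countRun, h]

-- on a list sorted by kDom, the adjacent-equal run from the head is exactly the elements
-- whose kDom equals the head's, and the rest is their complement
theorem take_drop_countRun (h : String) (l : List String)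
    (hp : (h :: l).Pairwise (fun a b => kDom a ≤ kDom b)) :
    (h :: l).take (countRun (h :: l)).toNat = (h :: l).filter (fun e => kDom e == kDom h)
    ∧ (h :: l).drop (countRun (h :: l)).toNat = (h :: l).filter (fun e => !(kDom e == kDom h)) := by
  induction l generalizing h with
  | nil => simp [countRun]
  | cons y rest ih =>
    by_cases hxy : kDom h = kDom y
    · have hc : countRun (h :: y :: rest) = 1 + countRun (y :: rest) := by
        simp [countRun, hxy]
      have hpos := countRun_pos (y :: rest)
      have htn : (1 + countRun (y :: rest)).toNat = (countRun (y :: rest)).toNat + 1 := by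
        omega
      obtain ⟨iht, ihd⟩ := ih y hp.tail
      have hpe : (fun (e : String) => kDom e == kDom h) = (fun e => kDom e == kDom y) := by
        funext e; rw [hxy]
      have hne : (fun (e : String) => !(kDom e == kDom h)) = (fun e => !(kDom e == kDom y)) := by
        funext e; rw [hxy]
      constructor
      · rw [hc, htn, List.take_succ_cons, List.filter_cons]
        simp only [beq_self_eq_true, if_true]
        rw [hpe, iht]
      · rw [hc, htn, List.drop_succ_cons, List.filter_cons]
        simp only [beq_self_eq_true, Bool.not_true, Bool.false_eq_true, if_false]
        rw [hne, ihd]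
    · have hc : countRun (h :: y :: rest) = 1 := by
        simp [countRun, beq_iff_eq, hxy]
      have hhy : kDom h < kDom y :=
        lt_of_le_of_ne ((List.pairwise_cons.mp hp).1 y (by simp)) hxy
      have htail : ∀ e ∈ y :: rest, kDom y ≤ kDom e := by
        intro e he
        rcases List.mem_cons.mp he with rfl | he2
        · exact le_refl _
        · exact (List.pairwise_cons.mp hp.tail).1 e he2
      have hall : ∀ e ∈ y :: rest, ¬ kDom e = kDom h := by
        intro e he heq
        exact absurd hhy (not_lt.mpr (heq ▸ htail e he))
      have hone : (1 : Int).toNat = 1 := rfl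
      constructor
      · rw [hc, hone, List.take_succ_cons, List.take_zero, List.filter_cons]
        simp only [beq_self_eq_true, if_true]
        rw [List.filter_eq_nil_iff.mpr (by intro e he; simpa [beq_iff_eq] using hall e he)]
      · rw [hc, hone, List.drop_succ_cons, List.drop_zero, List.filter_cons]
        simp only [beq_self_eq_true, Bool.not_true, Bool.false_eq_true, if_false]
        rw [List.filter_eq_self.mpr (by intro e he; simpa [beq_iff_eq] using hall e he)]

-- insertBy walks past a block on which the comparison is false
theorem insertBy_append_not (p : String → String → Bool) (x : String) (l1 l2 : List String)
    (h : ∀ a ∈ l1, p x a = false) :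
    PySem.List.insertBy p x (l1 ++ l2) = l1 ++ PySem.List.insertBy p x l2 := by
  induction l1 with
  | nil => rfl
  | cons a t ih =>
    have ha : p x a = false := h a (by simp)
    simp only [List.cons_append, PySem.List.insertBy, ha]
    simp [ih (fun b hb => h b (by simp [hb]))]

-- insertBy puts x in front when the comparison holds at the head
theorem insertBy_all_before (p : String → String → Bool) (x : String) (l : List String)
    (h : ∀ a ∈ l, p x a = true) : PySem.List.insertBy p x l = x :: l := by
  cases l with
  | nil => rfl
  | cons a t => simp [PySem.List.insertBy, h a (by simp)]

-- THE STABILITY LEMMA: if d is a lower bound for the keys, a stable sort by kDom puts the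
-- elements with key d first, in input order, followed by the sort of the rest
theorem sorted_min_split (xs : List String) (d : String) (h : ∀ e ∈ xs, d ≤ kDom e) :
    PySem.List.sorted xs kDom = xs.filter (fun e => kDom e == d)
      ++ PySem.List.sorted (xs.filter (fun e => !(kDom e == d))) kDom := by
  induction xs using List.reverseRecOn with
  | nil => rfl
  | append_singleton xs x ih =>
    have hins : ∀ (ys : List String),
        PySem.List.sorted (ys ++ [x]) kDom
        = PySem.List.insertBy (fun a b => decide (kDom a < kDom b)) x (PySem.List.sorted ys kDom) := by
      intro ys
      rw [PySem.List.sorted_eq_foldl_insertBy, PySem.List.sorted_eq_foldl_insertBy, List.foldl_append]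
      rfl
    have ih' := ih (fun e he => h e (by simp [he]))
    have hd : d ≤ kDom x := h x (by simp)
    by_cases hx : kDom x = d
    · have hF : ∀ a ∈ xs.filter (fun e => kDom e == d),
          (fun a b => decide (kDom a < kDom b)) x a = false := by
        intro a ha
        have := (List.mem_filter.mp ha).2
        simp only [beq_iff_eq] at this
        simp [this, hx]
      have hS : ∀ a ∈ PySem.List.sorted (xs.filter (fun e => !(kDom e == d))) kDom,
          (fun a b => decide (kDom a < kDom b)) x a = true := by
        intro a ha
        have ham := (PySem.List.mem_sorted _ _ _ _).mp ha
        have h1 := h a (by simp [(List.mem_filter.mp ham).1])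
        have h2 := (List.mem_filter.mp ham).2
        simp only [Bool.not_eq_eq_eq_not, Bool.not_true, beq_eq_false_iff_ne, ne_eq] at h2
        simp only [decide_eq_true_eq, hx]
        exact lt_of_le_of_ne h1 (fun hc => h2 hc.symm)
      rw [hins, ih', insertBy_append_not _ _ _ _ hF, insertBy_all_before _ _ _ hS]
      rw [List.filter_append, List.filter_append]
      simp only [List.filter_cons, List.filter_nil, hx, beq_self_eq_true, if_true,
        Bool.not_true, Bool.false_eq_true, if_false, List.append_nil]
      rw [List.append_assoc]
      rfl
    · have hF : ∀ a ∈ xs.filter (fun e => kDom e == d),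
          (fun a b => decide (kDom a < kDom b)) x a = false := by
        intro a ha
        have := (List.mem_filter.mp ha).2
        simp only [beq_iff_eq] at this
        have hdx : d < kDom x := lt_of_le_of_ne hd (fun hc => hx hc.symm)
        simp [this, not_lt.mpr (le_of_lt hdx)]
      rw [hins, ih', insertBy_append_not _ _ _ _ hF]
      rw [List.filter_append, List.filter_append]
      simp only [List.filter_cons, List.filter_nil, beq_iff_eq, hx, if_false,
        Bool.not_eq_eq_eq_not, Bool.not_true]
      rw [if_pos (by simp [hx]), hins]
      simp

-- the bucket decomposition of a stable sort: with D a strictly increasing list covering all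
-- keys of xs, sorting xs by kDom concatenates the per-key buckets in the order of D
theorem sorted_eq_flatMap_buckets (D : List String) (xs : List String)
    (hp : D.Pairwise (· < ·)) (hm : ∀ e ∈ xs, kDom e ∈ D) :
    PySem.List.sorted xs kDom = D.flatMap (fun d => xs.filter (fun e => kDom e == d)) := by
  induction D generalizing xs with
  | nil =>
    cases xs with
    | nil => rfl
    | cons e t => exact absurd (hm e (by simp)) (by simp)
  | cons d D' ih =>
    have hmin : ∀ e ∈ xs, d ≤ kDom e := by
      intro e he
      rcases List.mem_cons.mp (hm e he) with heq | hmem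
      · exact le_of_eq heq.symm
      · exact le_of_lt ((List.pairwise_cons.mp hp).1 _ hmem)
    have hm' : ∀ e ∈ xs.filter (fun e => !(kDom e == d)), kDom e ∈ D' := by
      intro e he
      obtain ⟨he1, he2⟩ := List.mem_filter.mp he
      rcases List.mem_cons.mp (hm e he1) with heq | hmem
      · simp [heq] at he2
      · exact hmem
    rw [sorted_min_split xs d hmin, ih _ hp.tail hm', List.flatMap_cons]
    congr 1
    apply List.flatMap_congr
    intro d' hd'
    have hdd' : d ≠ d' := ne_of_lt ((List.pairwise_cons.mp hp).1 d' hd')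
    rw [List.filter_filter]
    apply List.filter_congr
    intro e he
    by_cases hc : kDom e = d'
    · rw [hc]
      simp [hdd'.symm]
    · have : (kDom e == d') = false := by simp [hc]
      rw [this]
      simp

-- the bucket dict built by B's first loop holds exactly the kDom-filters of the input
theorem getD_buckets (emails : List String) (c : String) :
    (emails.foldl (fun d e => PySem.Dict.modify d (kDom e) [] (fun l => l ++ [e]))
      PySem.Dict.empty).getD c []
    = emails.filter (fun e => kDom e == c) := by
  have hmap : emails.foldl (fun d e => PySem.Dict.modify d (kDom e) [] (fun l => l ++ [e]))
        PySem.Dict.empty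
      = (emails.map (fun e => (kDom e, e))).foldl
          (fun d p => PySem.Dict.modify d p.1 [] (fun l => l ++ [p.2])) PySem.Dict.empty := by
    rw [List.foldl_map]
  rw [hmap, PySem.Dict.getD_foldl_modify_append, PySem.Dict.getD_empty]
  rw [List.filter_map, List.map_map]
  simp [Function.comp_def]

-- its keys are the distinct domains in first-occurrence order
theorem keys_buckets (emails : List String) :
    (emails.foldl (fun d e => PySem.Dict.modify d (kDom e) [] (fun l => l ++ [e]))
      PySem.Dict.empty).keys
    = PySem.Set.ofList (emails.map kDom) := by
  rw [PySem.Dict.keys_foldl_modify_key emails kDom [] (fun _ e l => l ++ [e]) PySem.Dict.empty]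
  rw [PySem.Dict.keys_empty]
  rfl

-- ===== VERDICT (by name: the statement is the Claim_ definition above) =====
theorem sort_email_spec : Claim_equal_sort_email := by
  intro emails _
  unfold Spec_sort_email
  have hB := getD_buckets emails
  have hK := keys_buckets emails
  cases hd : PySem.List.sorted (PySem.Set.ofList (emails.map kDom)) (fun x => x) with
  | nil =>
    have hnil : emails = [] := by
      cases emails with
      | nil => rfl
      | cons e t =>
        have : kDom e ∈ PySem.List.sorted (PySem.Set.ofList ((e :: t).map kDom)) (fun x => x) := by
          rw [PySem.List.mem_sorted, PySem.Set.mem_ofList]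
          exact List.mem_map_of_mem (by simp)
        rw [hd] at this
        simp at this
    subst hnil
    rfl
  | cons d0 rest =>
    have hp : (d0 :: rest).Pairwise (· < ·) := by
      rw [← hd]; exact PySem.List.sorted_ofList_pairwise_lt _
    have hm : ∀ e ∈ emails, kDom e ∈ d0 :: rest := by
      intro e he
      rw [← hd, PySem.List.mem_sorted, PySem.Set.mem_ofList]
      exact List.mem_map_of_mem he
    have hS : PySem.List.sorted emails kDom
        = (d0 :: rest).flatMap (fun d => emails.filter (fun e => kDom e == d)) :=
      sorted_eq_flatMap_buckets _ _ hp hm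
    -- B reduces to: sorted bucket(d0) by kLoc, then the remaining buckets in key order
    have hBside : sort_email_alt emails
        = PySem.List.sorted (emails.filter (fun e => kDom e == d0)) kLoc
          ++ rest.flatMap (fun d => emails.filter (fun e => kDom e == d)) := by
      simp only [sort_email_alt]
      rw [hK, hd]
      simp only [hB]
      rw [PySem.List.foldl_append_eq_flatMap]
    rw [hBside]
    -- A reduces to: sorted first-run by kLoc, then the rest of the domain-sorted list
    simp only [sort_email]
    cases hs : PySem.List.sorted emails kDom with
    | nil =>
      exfalso
      have hemp : emails = [] := (PySem.List.sorted_eq_nil_iff _ _ _).mp hs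
      subst hemp
      cases (show ([] : List String) = d0 :: rest from hd)
    | cons h t =>
      have hpS : (h :: t).Pairwise (fun a b => kDom a ≤ kDom b) := by
        rw [← hs]; exact PySem.List.sorted_pairwise ..
      obtain ⟨ht, htd⟩ := take_drop_countRun h t hpS
      have hpos := countRun_pos (h :: t)
      rw [PySem.List.slice_to _ (by omega), PySem.List.slice_from _ (by omega), ht, htd]
      -- identify the head's domain with d0
      have hb0ne : emails.filter (fun e => kDom e == d0) ≠ [] := by
        have hd0m : d0 ∈ PySem.Set.ofList (emails.map kDom) := by
          have : d0 ∈ PySem.List.sorted (PySem.Set.ofList (emails.map kDom)) (fun x => x) := by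
            rw [hd]; simp
          rwa [PySem.List.mem_sorted] at this
        rw [PySem.Set.mem_ofList] at hd0m
        obtain ⟨e, he, hke⟩ := List.mem_map.mp hd0m
        intro hnil
        have : e ∈ emails.filter (fun e => kDom e == d0) :=
          List.mem_filter.mpr ⟨he, by simp [hke]⟩
        simp [hnil] at this
      have hhd0 : kDom h = d0 := by
        rw [hS] at hs
        cases hb : emails.filter (fun e => kDom e == d0) with
        | nil => exact absurd hb hb0ne
        | cons b0 bt =>
          rw [List.flatMap_cons, hb] at hs
          have hh : h = b0 := by
            simp only [List.cons_append] at hs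
            exact (List.cons.injEq .. ▸ hs).1.symm ▸ rfl
          have : b0 ∈ emails.filter (fun e => kDom e == d0) := by rw [hb]; simp
          have := (List.mem_filter.mp this).2
          rw [hh]
          simpa using this
      -- filters of S collapse to the buckets
      have hrest_ne : ∀ e, ∀ d' ∈ rest, kDom e = d' → ¬ (kDom e == d0) = true := by
        intro e d' hd' hke
        have : d0 < d' := (List.pairwise_cons.mp hp).1 d' hd'
        simp [hke, ne_of_gt this]
      have e1 : (emails.filter (fun e => kDom e == d0)).filter (fun e => kDom e == d0)
          = emails.filter (fun e => kDom e == d0) :=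
        List.filter_eq_self.mpr (fun a ha => (List.mem_filter.mp ha).2)
      have e2 : (rest.flatMap (fun d => emails.filter (fun e => kDom e == d))).filter
            (fun e => kDom e == d0) = [] := by
        apply List.filter_eq_nil_iff.mpr
        intro a ha
        obtain ⟨d', hd', ha'⟩ := List.mem_flatMap.mp ha
        have := (List.mem_filter.mp ha').2
        simp only [beq_iff_eq] at this
        exact hrest_ne a d' hd' this
      have e3 : (emails.filter (fun e => kDom e == d0)).filter (fun e => !(kDom e == d0))
          = [] := by
        apply List.filter_eq_nil_iff.mpr
        intro a ha
        have := (List.mem_filter.mp ha).2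
        simp [this]
      have e4 : (rest.flatMap (fun d => emails.filter (fun e => kDom e == d))).filter
            (fun e => !(kDom e == d0))
          = rest.flatMap (fun d => emails.filter (fun e => kDom e == d)) := by
        apply List.filter_eq_self.mpr
        intro a ha
        obtain ⟨d', hd', ha'⟩ := List.mem_flatMap.mp ha
        have := (List.mem_filter.mp ha').2
        simp only [beq_iff_eq] at this
        simpa using hrest_ne a d' hd' this
      have hfilt1 : (h :: t).filter (fun e => kDom e == kDom h)
          = emails.filter (fun e => kDom e == d0) := by
        rw [hhd0, ← hs, hS, List.flatMap_cons, List.filter_append, e1, e2, List.append_nil]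
      have hfilt2 : (h :: t).filter (fun e => !(kDom e == kDom h))
          = rest.flatMap (fun d => emails.filter (fun e => kDom e == d)) := by
        rw [hhd0, ← hs, hS, List.flatMap_cons, List.filter_append, e3, e4, List.nil_append]
      rw [hfilt1, hfilt2]
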